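-- pv_equiv track=rewrite | github.com/collinsakenga/codewars_solutions | 6 kyu/6 kyu_Square string tops.py | tops
-- ===== SOURCE A (Python) =====
-- def tops(msg):
--     count = 2
--     start = 2
--     increment = 7
--     solution = ""
--     while True:
--         if start >= len(msg):
--             return solution
--         solution = msg[start:start+count]+solution
--         start += increment
--         count += 1
--         increment += 4
-- ===== SOURCE B (Python) =====
-- def tops(msg):
--     def rec(rest, j):
--         if not rest:
--             return ""
--         return rec(rest[4 * j + 7:], j + 1) + rest[:j + 2]
--     return rec(msg[2:], 0)
-- ===== Notes on version B (the rewrite author's own statement) =====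
-- stated objective: alternative
-- what changed: Replaces the indexed while-loop with three threaded counters over the whole string by a structural recursion that consumes successive suffixes of the string (take the head segment, drop the gap, recurse), testing emptiness instead of comparing indices against len(msg).
import Mathlib
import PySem

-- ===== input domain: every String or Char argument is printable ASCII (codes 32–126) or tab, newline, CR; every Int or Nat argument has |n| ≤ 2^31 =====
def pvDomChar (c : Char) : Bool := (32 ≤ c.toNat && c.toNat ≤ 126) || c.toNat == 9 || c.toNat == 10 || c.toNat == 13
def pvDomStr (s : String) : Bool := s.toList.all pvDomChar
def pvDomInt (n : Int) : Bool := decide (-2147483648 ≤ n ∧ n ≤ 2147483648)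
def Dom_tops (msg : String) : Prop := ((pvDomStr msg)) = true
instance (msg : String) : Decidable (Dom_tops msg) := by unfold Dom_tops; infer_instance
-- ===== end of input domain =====

-- B replaces A's indexed while-loop with three threaded counters by a structural
-- recursion over suffixes of the string (alternative decomposition, same cost class).

-- ===== PORT A =====
-- A's while loop: state (count, start, increment, solution); fuel = len(msg) bounds the
-- iteration count (start begins at 2 and grows by ≥ 7 each step), so fuel never runs out.
def topsLoopA (s : List Char) (fuel count start increment : Nat) (solution : List Char) : List Char :=
  match fuel with
  | 0 => solution
  | fuel + 1 =>
    if s.length ≤ start then solution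
    else topsLoopA s fuel (count + 1) (start + increment) (increment + 4)
      (PySem.List.slice s (some (start : Int)) (some ((start : Int) + (count : Int))) ++ solution)

def tops (msg : String) : String :=
  String.ofList (topsLoopA msg.toList msg.toList.length 2 2 7 [])

-- ===== PORT B =====
-- Source B's inner 'rec': if rest is empty return ""; else recurse on rest[4j+7:] with j+1
-- and append rest[:j+2]. Terminates because the recursive call drops ≥ 7 characters.
def topsRecB (rest : List Char) (j : Nat) : List Char :=
  if h : rest = [] then []
  else
    topsRecB (PySem.List.slice rest (some ((4 * j + 7 : Nat) : Int)) none) (j + 1)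
      ++ PySem.List.slice rest none (some ((j + 2 : Nat) : Int))
termination_by rest.length
decreasing_by
  rw [PySem.List.slice_from_natCast]
  have hp : 0 < rest.length := List.length_pos_of_ne_nil h
  simp only [List.length_drop]
  omega

def tops_alt (msg : String) : String :=
  String.ofList (topsRecB (PySem.List.slice msg.toList (some ((2 : Nat) : Int)) none) 0)

-- ===== PRECONDITION & SPEC =====
def Spec_tops (msg : String) (out : String) : Prop := out = tops_alt msg
instance (msg : String) (out : String) : Decidable (Spec_tops msg out) := by unfold Spec_tops; infer_instance

-- ===== CLAIM =====
def Claim_equal_tops : Prop := ∀ (msg : String), Dom_tops msg → Spec_tops msg (tops msg)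

-- ===== LEMMAS AND PROOFS =====

lemma loop_eq (s : List Char) (fuel : Nat) : ∀ (j start : Nat) (acc : List Char),
    s.length ≤ start + fuel →
    topsLoopA s fuel (j + 2) start (4 * j + 7) acc
      = topsRecB (s.drop start) j ++ acc := by
  induction fuel with
  | zero =>
    intro j start acc h
    rw [topsLoopA, topsRecB]
    rw [dif_pos (List.drop_eq_nil_of_le (by omega))]
    simp
  | succ fuel ih =>
    intro j start acc h
    by_cases hlt : start < s.length
    · rw [topsLoopA, if_neg (by omega)]
      have e2 : 4 * j + 7 + 4 = 4 * (j + 1) + 7 := by ring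
      have e3 : j + 2 + 1 = (j + 1) + 2 := by ring
      rw [e2, e3, ih (j + 1) (start + (4 * j + 7)) _ (by omega)]
      conv_rhs => rw [topsRecB]
      rw [dif_neg (by simp [List.drop_eq_nil_iff]; omega)]
      rw [PySem.List.slice_from_natCast, PySem.List.slice_to_natCast, List.drop_drop,
        PySem.List.slice_natCast_add]
      simp
    · rw [topsLoopA, if_pos (by omega), topsRecB]
      rw [dif_pos (List.drop_eq_nil_of_le (by omega))]
      simp

-- ===== VERDICT =====
theorem tops_spec : Claim_equal_tops := by
  intro msg _
  unfold Spec_tops tops tops_alt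
  rw [PySem.List.slice_from_natCast]
  have h := loop_eq msg.toList msg.toList.length 0 2 [] (by omega)
  norm_num at h
  simp only [String.length_toList]
  rw [h]
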